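-- pv_equiv track=rewrite | github.com/ilgabri/IPSE_DISCO | IPSE_DB_modules/MP_funct.py | MP_elements4query
-- ===== SOURCE A (Python) =====
-- import itertools
--
-- def MP_elements(a,b,c): #creates list of lists. Lists are joined by AND, elements inside list by OR. Will be used to make multiple MP queries since there MP has no "or"
--     ion_list=[a,b,c]
--     elist=[]
--     for ion in ion_list:
--         if ion[0]=="any": continue #index 0 cause "any" is tranformed into a list
--         if any(isinstance(i,list) for i in ion):#if any item is a list, lists are joined by AND, elements inside list are joined by OR
--             for els in ion:
--                 elist.append(els)
--         else:
--             elist.append(ion)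
--     return elist
--
-- def MP_elements4query(A,B,C): #creates a list of element queries MP. In particular, it is a list of dictionaries, each containing "elements" and "exclude" keys to compensate for lack of "or"
--     andlist=MP_elements(A,B,C)
--     andlist=[x for x in andlist if x is not ["any"]]
--     #from here a convoluted way to create a series of queries with "elements" and "exclude_elements" to compensate for the lack of "or" in MP
--     combos=list(itertools.product(*andlist))#creates all possible combinations fo elelments in the lists of andlist
--     for n,com in enumerate(combos):
--         chg=0 #varible to check how many elements changed for one iteration to another
--         if n==0:
--             Qelem=[{"elements":list(com),"exclude":[]}] #Qelem is a list of dictionaries, each element saying which elements to include and which to exclude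
--             excluded=[ [] for _ in range(len(com)) ] #list containing the elements to be excluded. See below to understand why is it a list of lists
--             continue
--         diff=[]
--         for idx,(i, im1) in enumerate(zip(com,combos[n-1])):
--             if i != im1:
--                 chg+=1 #counts how many elements have changed
--                 excluded[idx].append(im1) #append the elements changed from one iter to another in the corresponding place of 'excluded'
--         if chg<2:
--             ltmp=[*(list(itertools.chain.from_iterable(excluded)))]#makes all elements of all lists of 'exclude' into one list
--             #KEPT AS LESSON #Qelem.append({"elements":list(com),"exclude":ex_tmp.copy()})#W/O COPY, Qelem gets modified when ex_tmp is modified! (yes, it's weird)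
--             Qelem.append({"elements":list(com),"exclude":ltmp})
--         else:
--             for i in range(2,chg+1):
--                 excluded[-(i-1)]=[]#empty lists of elements in the position when the 'sequencing starts over [...]'
--             #excluded[-(chg-1)]=[]#empty lists of elements in the position when the 'sequencing starts over [...]'
--             ltmp=[*(list(itertools.chain.from_iterable(excluded)))]#see above
--             Qelem.append({"elements":list(com),"exclude":ltmp})
--     return Qelem
-- ===== SOURCE B (Python) =====
-- import itertools
--
-- def MP_elements4query(A, B, C):
--     """Build one MP query per combination of the AND-groups (one element chosen
--     from each group).  Each query lists the chosen elements and the elements to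
--     exclude: a column's exclusions collect the values it has shown since they
--     last started over, and the exclusions of the last m-1 columns start over
--     whenever a combination changes m >= 2 columns at once."""
--     groups = [g for g in (A, B, C) if g[0] != "any"]
--     k = len(groups)
--     excl = [[] for _ in range(k)]
--     queries = []
--     for digits in itertools.product(*(range(len(g)) for g in groups)):
--         if any(digits):
--             # the column that just advanced is the last nonzero digit; every
--             # column to its right rolled over from its last element to its first
--             p = max(i for i in range(k) if digits[i])
--             previous = [g[d - 1] if i == p else (g[-1] if i > p else g[d])
--                         for i, (g, d) in enumerate(zip(groups, digits))]
--             changed = [i for i in range(k) if previous[i] != groups[i][digits[i]]]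
--             excl = [excl[i] + [previous[i]] if i in changed else excl[i]
--                     for i in range(k)]
--             if len(changed) > 1:
--                 keep = k - len(changed) + 1
--                 excl = excl[:keep] + [[] for _ in range(k - keep)]
--         queries.append({"elements": [g[d] for g, d in zip(groups, digits)],
--                         "exclude": [v for e in excl for v in e]})
--     return queries
-- ===== Notes on version B (the rewrite author's own statement) =====
-- stated objective: alternative
-- what changed: B enumerates index tuples (product of ranges) directly and, for each tuple, reconstructs the predecessor combination from the digits (advanced position = last nonzero digit, rolled columns restart from their last element), updating the per-column exclusion state functionally; A materializes the full list of string combinations and diffs each against the previous one with a mutable chg counter and negative-index reset loop. Pre_ excludes empty argument lists, on which A raises (IndexError on ion[0], or NameError since Qelem is never assigned).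
import Mathlib
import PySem

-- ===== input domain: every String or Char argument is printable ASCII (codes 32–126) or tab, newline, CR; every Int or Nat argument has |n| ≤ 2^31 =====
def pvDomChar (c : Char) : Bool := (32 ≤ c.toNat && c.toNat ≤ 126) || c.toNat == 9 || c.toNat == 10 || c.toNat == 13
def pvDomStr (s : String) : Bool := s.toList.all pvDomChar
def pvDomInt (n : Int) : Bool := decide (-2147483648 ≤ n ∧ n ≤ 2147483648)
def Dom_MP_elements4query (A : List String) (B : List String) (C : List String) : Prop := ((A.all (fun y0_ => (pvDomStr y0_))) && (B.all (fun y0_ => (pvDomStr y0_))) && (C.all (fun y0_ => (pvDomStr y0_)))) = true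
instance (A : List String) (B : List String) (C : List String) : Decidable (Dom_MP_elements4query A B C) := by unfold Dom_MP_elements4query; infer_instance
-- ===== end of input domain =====

-- B enumerates index tuples directly and reconstructs each predecessor combination
-- from the digits, updating the exclusion state functionally, instead of A's
-- materialized combination list with consecutive diffing, a mutable chg counter
-- and a negative-index reset loop (objective: alternative; no speed claim).

-- ===== PORT A =====

-- {"elements": el, "exclude": ex} as an insertion-ordered association list
def pvMkQ (el ex : List String) : List (String × List String) :=
  [("elements", el), ("exclude", ex)]

-- MP_elements: the arguments are lists of strings, so 'any(isinstance(i,list) for i in ion)'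
-- is always False and only the else-branch 'elist.append(ion)' runs.
-- 'ion[0]' is PySem.List.pyGetD ion 0 (the IndexError on [] is excluded by Pre_).
def MP_elements (a : List String) (b : List String) (c : List String) : List (List String) :=
  [a, b, c].foldl
    (fun elist ion =>
      if PySem.List.pyGetD ion 0 "" == "any" then elist else elist ++ [ion]) []

-- itertools.product(*andlist), as the standard product recursion
def pvProduct : List (List String) → List (List String)
  | [] => [[]]
  | c :: cs => c.flatMap (fun x => (pvProduct cs).map (x :: ·))

-- 'for idx,(i, im1) in enumerate(zip(com,combos[n-1])): if i != im1: chg+=1; excluded[idx].append(im1)'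
-- computed as (chg, updated excluded); each position is touched at most once.
def pvDiff : List String → List String → List (List String) → Nat × List (List String)
  | i :: com, im1 :: prev, e :: exc =>
    let r := pvDiff com prev exc
    if i ≠ im1 then (r.1 + 1, (e ++ [im1]) :: r.2) else (r.1, e :: r.2)
  | _, _, exc => (0, exc)

-- 'for i in range(2,chg+1): excluded[-(i-1)]=[]'
def pvClear (chg : Nat) (exc : List (List String)) : List (List String) :=
  (PySem.List.pyRange 2 ((chg : Int) + 1) 1).foldl
    (fun e i => PySem.List.pySetD e (-(i - 1)) ([] : List String)) exc

-- one iteration's update of 'excluded' (both branches then flatten the updated value)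
def pvStep (com prev : List String) (excluded : List (List String)) : List (List String) :=
  let r := pvDiff com prev excluded
  if r.1 < 2 then r.2 else pvClear r.1 r.2

-- the loop body for n ≥ 1, carrying prev = combos[n-1]
def pvLoopA : List (List String) → List String → List (List String) →
    List (List (String × List String)) → List (List (String × List String))
  | [], _, _, qelem => qelem
  | com :: rest, prev, excluded, qelem =>
    pvLoopA rest com (pvStep com prev excluded)
      (qelem ++ [pvMkQ com (pvStep com prev excluded).flatten])

def MP_elements4query (A : List String) (B : List String) (C : List String) :
    List (List (String × List String)) :=
  let andlist := MP_elements A B C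
  -- '[x for x in andlist if x is not ["any"]]': 'is not' a fresh literal is always True
  let combos := pvProduct andlist
  match combos with
  | [] => []  -- Python: Qelem is never assigned → NameError (excluded by Pre_)
  | com0 :: rest =>
    pvLoopA rest com0 (List.replicate com0.length []) [pvMkQ com0 []]

-- ===== PORT B =====

-- [g for g in (A, B, C) if g[0] != "any"]
def pvGroups (A : List String) (B : List String) (C : List String) : List (List String) :=
  [A, B, C].filter (fun g => !(PySem.List.pyGetD g 0 "" == "any"))

-- '[g[d] for g, d in zip(groups, digits)]'
def pvVals (cols : List (List String)) (d : List Nat) : List String :=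
  List.zipWith (fun col i => col.getD i "") cols d

-- itertools.product(*(range(len(g)) for g in groups))
def pvDT : List (List String) → List (List Nat)
  | [] => [[]]
  | c :: cs => (List.range c.length).flatMap (fun i => (pvDT cs).map (i :: ·))

-- 'max(i for i in range(k) if digits[i])': the last index holding a nonzero digit
def pvLastNZ : List Nat → Option Nat
  | [] => none
  | d :: ds =>
    match pvLastNZ ds with
    | some j => some (j + 1)
    | none => if d ≠ 0 then some 0 else none

-- '[g[d-1] if i == p else (g[-1] if i > p else g[d]) for i, (g, d) in enumerate(zip(groups, digits))]'
def pvPrev : List (List String × Nat) → Nat → List String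
  | [], _ => []
  | (g, d) :: rest, 0 =>
    g.getD (d - 1) "" :: rest.map (fun gd => gd.1.getD (gd.1.length - 1) "")
  | (g, d) :: rest, p + 1 => g.getD d "" :: pvPrev rest p

-- '[i for i in range(k) if previous[i] != groups[i][digits[i]]]'
def pvChangedIdx : List (String × String) → Nat → List Nat
  | [], _ => []
  | (x, y) :: rest, b =>
    if x ≠ y then b :: pvChangedIdx rest (b + 1) else pvChangedIdx rest (b + 1)

-- the body of B's for-loop over digit tuples, carrying (excl, queries)
def pvStepB (groups : List (List String))
    (st : List (List String) × List (List (String × List String))) (digits : List Nat) :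
    List (List String) × List (List (String × List String)) :=
  let k := groups.length
  let excl :=
    if digits.any (fun d => d ≠ 0) then
      let p := (pvLastNZ digits).getD 0
      let prev := pvPrev (groups.zip digits) p
      let changed := pvChangedIdx (prev.zip (pvVals groups digits)) 0
      let e1 := (List.range k).map (fun i =>
        if i ∈ changed then st.1.getD i [] ++ [prev.getD i ""] else st.1.getD i [])
      if 1 < changed.length then
        e1.take (k - changed.length + 1) ++ List.replicate (k - (k - changed.length + 1)) []
      else e1
    else st.1
  (excl, st.2 ++ [pvMkQ (pvVals groups digits) excl.flatten])

def MP_elements4query_alt (A : List String) (B : List String) (C : List String) :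
    List (List (String × List String)) :=
  let groups := pvGroups A B C
  ((pvDT groups).foldl (pvStepB groups) (List.replicate groups.length [], [])).2

-- ===== PRECONDITION & SPEC =====
-- Pre_ excludes empty argument lists, on which A raises: an IndexError on 'ion[0]',
-- or a NameError ('Qelem' is never assigned) when a kept group is empty so that
-- itertools.product yields no combination.
def Pre_MP_elements4query (A : List String) (B : List String) (C : List String) : Prop :=
  A ≠ [] ∧ B ≠ [] ∧ C ≠ []
instance (A : List String) (B : List String) (C : List String) : Decidable (Pre_MP_elements4query A B C) := by unfold Pre_MP_elements4query; infer_instance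

def pvWitness_MP_elements4query : List String × List String × List String :=
  (["Fe", "Ni"], ["O", "S"], ["H"])

def Spec_MP_elements4query (A : List String) (B : List String) (C : List String) (out : List (List (String × List String))) : Prop := out = MP_elements4query_alt A B C
instance (A : List String) (B : List String) (C : List String) (out : List (List (String × List String))) : Decidable (Spec_MP_elements4query A B C out) := by unfold Spec_MP_elements4query; infer_instance

-- ===== CLAIM =====
def Claim_equal_MP_elements4query : Prop := ∀ (A : List String) (B : List String) (C : List String), Dom_MP_elements4query A B C → Pre_MP_elements4query A B C → Spec_MP_elements4query A B C (MP_elements4query A B C)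

-- ===== LEMMAS AND PROOFS =====

def pvMaxd (cols : List (List String)) : List Nat := cols.map (fun c => c.length - 1)
def pvZeros (cols : List (List String)) : List Nat := cols.map (fun _ => 0)

def pvTrail : List (List String) → List Nat → List (List Nat)
  | [], _ => []
  | c :: cs, d0 :: ds =>
    ((pvTrail cs ds).map (d0 :: ·)) ++
    (List.range' (d0 + 1) (c.length - (d0 + 1))).flatMap (fun i => (pvDT cs).map (i :: ·))
  | _ :: _, [] => []

def pvValid (cols : List (List String)) (d : List Nat) : Prop :=
  List.Forall₂ (fun c i => i < c.length) cols d

def pvFindP : List (List String × Nat) → Option Nat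
  | [] => none
  | (g, d) :: rest =>
    match pvFindP rest with
    | some j => some (j + 1)
    | none => if d < g.length - 1 then some 0 else none

def pvSuccD : Nat → List Nat → List Nat
  | _, [] => []
  | 0, d :: ds => (d + 1) :: ds.map (fun _ => 0)
  | p + 1, d :: ds => d :: pvSuccD p ds

def pvClearN (n : Nat) (l : List (List String)) : List (List String) :=
  l.take (l.length - n) ++ List.replicate n []

lemma pvDiff_fst_le (com prev : List String) (E : List (List String)) :
    (pvDiff com prev E).1 ≤ E.length := by
  induction com generalizing prev E with
  | nil => cases prev <;> cases E <;> simp [pvDiff]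
  | cons i com ih =>
    cases prev with
    | nil => simp [pvDiff]
    | cons im1 prev =>
      cases E with
      | nil => simp [pvDiff]
      | cons e exc =>
        simp only [pvDiff, List.length_cons]
        split_ifs <;> simp only [] <;>
          [exact Nat.succ_le_succ (ih prev exc);
           exact Nat.le_succ_of_le (ih prev exc)]

lemma pvDiff_len (com prev : List String) (E : List (List String)) :
    (pvDiff com prev E).2.length = E.length := by
  induction com generalizing prev E with
  | nil => cases prev <;> cases E <;> simp [pvDiff]
  | cons i com ih =>
    cases prev with
    | nil => simp [pvDiff]
    | cons im1 prev =>
      cases E with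
      | nil => simp [pvDiff]
      | cons e exc =>
        simp only [pvDiff, List.length_cons]
        split_ifs <;> simp [ih prev exc]

lemma pvSetD_neg {α : Type} (l : List α) (k : Nat) (v : α) (h1 : 0 < k)
    (h2 : k ≤ l.length) :
    PySem.List.pySetD l (-(k : Int)) v = l.set (l.length - k) v := by
  have hneg : ¬ (0 ≤ -(k : Int)) := by omega
  have hge : -(l.length : Int) ≤ -(k : Int) := by omega
  simp only [PySem.List.pySetD, PySem.List.pySet?, PySem.List.pyIdx?, if_neg hneg,
    if_pos hge, Option.map_some, Option.getD_some]
  congr 1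
  omega

lemma pvClearN_len (n : Nat) (l : List (List String)) (h : n ≤ l.length) :
    (pvClearN n l).length = l.length := by
  simp [pvClearN]; omega

lemma pvClear_eq_clearN (chg : Nat) (l : List (List String))
    (h2 : 2 ≤ chg) (hle : chg - 1 ≤ l.length) :
    pvClear chg l = pvClearN (chg - 1) l := by
  induction chg, h2 using Nat.le_induction with
  | base =>
    rw [pvClear]
    push_cast
    rw [show PySem.List.pyRange 2 3 = [2] from by decide]
    simp only [List.foldl_cons, List.foldl_nil]
    rw [show (-((2 : Int) - 1)) = -((1 : Nat) : Int) by norm_num]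
    rw [pvSetD_neg l 1 _ (by omega) (by omega)]
    rw [List.set_eq_take_append_cons_drop]
    rw [if_pos (by omega : l.length - 1 < l.length)]
    rw [List.drop_eq_nil_of_le (by omega)]
    simp [pvClearN]
  | succ chg hchg ih =>
    have hle' : chg - 1 ≤ l.length := by omega
    have hchgle : chg ≤ l.length := by omega
    rw [pvClear]
    have hr : PySem.List.pyRange 2 (((chg + 1 : Nat) : Int) + 1) 1
        = PySem.List.pyRange 2 (((chg : Nat) : Int) + 1) 1 ++ [((chg : Nat) : Int) + 1] := by
      have := PySem.List.pyRange_one_succ_right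
        (a := 2) (b := ((chg : Nat) : Int) + 1) (by omega)
      push_cast
      push_cast at this
      convert this using 2
    rw [hr, List.foldl_append]
    rw [show (PySem.List.pyRange 2 (((chg : Nat) : Int) + 1) 1).foldl
        (fun e i => PySem.List.pySetD e (-(i - 1)) ([] : List String)) l = pvClear chg l from rfl]
    rw [ih hle']
    simp only [List.foldl_cons, List.foldl_nil]
    have hlenC : (pvClearN (chg - 1) l).length = l.length := pvClearN_len _ _ hle'
    rw [show (-(((chg : Nat) : Int) + 1 - 1)) = -((chg : Nat) : Int) by ring_nf]
    rw [pvSetD_neg _ chg _ (by omega) (by omega)]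
    rw [hlenC]
    rw [pvClearN, pvClearN]
    rw [List.set_append]
    have hcond : l.length - chg < (List.take (l.length - (chg - 1)) l).length := by
      simp; omega
    rw [if_pos hcond]
    have hset : (List.take (l.length - (chg - 1)) l).set (l.length - chg) []
        = List.take (l.length - chg) l ++ [([] : List String)] := by
      rw [List.set_eq_take_append_cons_drop, if_pos hcond]
      rw [List.take_take, List.drop_take]
      have h1 : min (l.length - chg) (l.length - (chg - 1)) = l.length - chg := by omega
      have h2 : l.length - (chg - 1) - (l.length - chg + 1) = 0 := by omega
      rw [h1, h2]
      simp
    rw [hset, List.append_assoc]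
    congr 1
    have h3 : chg + 1 - 1 = (chg - 1) + 1 := by omega
    rw [h3, List.replicate_succ]
    rfl

lemma pvRange_pos (n : Nat) (h : 0 < n) :
    List.range n = 0 :: List.range' 1 (n - 1) := by
  obtain ⟨m, rfl⟩ : ∃ m, n = m + 1 := ⟨n - 1, by omega⟩
  rw [List.range_eq_range']
  rw [show m + 1 - 1 = m by omega]
  exact List.range'_succ

lemma pvSelf_eq_map_range (c : List String) :
    c = (List.range c.length).map (fun i => c.getD i "") := by
  apply List.ext_getElem (by simp)
  intro i h1 h2
  simp only [List.getElem_map, List.getElem_range]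
  rw [List.getD_eq_getElem c "" h1]

lemma pvDT_cons (cols : List (List String)) (hne : ∀ c ∈ cols, c ≠ []) :
    pvDT cols = pvZeros cols :: pvTrail cols (pvZeros cols) := by
  induction cols with
  | nil => rfl
  | cons c cs ih =>
    have hc : 0 < c.length := List.length_pos_of_ne_nil (hne c (by simp))
    have ihr := ih (fun c' h => hne c' (by simp [h]))
    show (List.range c.length).flatMap (fun i => (pvDT cs).map (i :: ·)) = _
    rw [pvRange_pos c.length hc, List.flatMap_cons, ihr]
    show ((0 :: pvZeros cs) :: (pvTrail cs (pvZeros cs)).map (0 :: ·)) ++ _ = _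
    rw [show pvZeros (c :: cs) = 0 :: pvZeros cs from rfl, pvTrail]
    rw [← ihr]
    simp

lemma pvProduct_eq (cols : List (List String)) :
    pvProduct cols = (pvDT cols).map (pvVals cols) := by
  induction cols with
  | nil => rfl
  | cons c cs ih =>
    rw [pvProduct, pvDT, ih, List.map_flatMap]
    conv_lhs => rw [pvSelf_eq_map_range c]
    rw [List.flatMap_map]
    congr 1
    funext i
    rw [List.map_map, List.map_map]
    exact List.map_congr_left (fun a _ => rfl)

lemma pvZeros_valid (cols : List (List String)) (hne : ∀ c ∈ cols, c ≠ []) :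
    pvValid cols (pvZeros cols) := by
  induction cols with
  | nil => exact List.Forall₂.nil
  | cons c cs ih =>
    exact List.Forall₂.cons (List.length_pos_of_ne_nil (hne c (by simp)))
      (ih (fun c' hh => hne c' (by simp [hh])))

lemma pvTrail_maxd (cols : List (List String)) :
    pvTrail cols (pvMaxd cols) = [] := by
  induction cols with
  | nil => rfl
  | cons c cs ih =>
    show ((pvTrail cs (pvMaxd cs)).map _) ++
      (List.range' (c.length - 1 + 1) (c.length - (c.length - 1 + 1))).flatMap _ = []
    rw [ih]
    have : c.length - (c.length - 1 + 1) = 0 := by omega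
    rw [this, List.range'_zero]
    simp

lemma pvFindP_none (cols : List (List String)) (d : List Nat)
    (hv : pvValid cols d) (h : pvFindP (cols.zip d) = none) : d = pvMaxd cols := by
  induction cols generalizing d with
  | nil => cases hv; rfl
  | cons c cs ih =>
    cases d with
    | nil => cases hv
    | cons d0 ds =>
      obtain ⟨hd0, hv'⟩ := List.forall₂_cons.mp hv
      rw [List.zip_cons_cons, pvFindP] at h
      cases hfp : pvFindP (cs.zip ds) with
      | some j => rw [hfp] at h; simp at h
      | none =>
        rw [hfp] at h
        simp only [] at h
        have hd0m : d0 = c.length - 1 := by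
          by_contra hc
          rw [if_pos (by omega)] at h
          simp at h
        rw [hd0m, ih ds hv' hfp]
        rfl

lemma pvMapZero (ds : List Nat) (cs : List (List String)) (h : ds.length = cs.length) :
    ds.map (fun _ => 0) = pvZeros cs := by
  rw [pvZeros, List.map_const', List.map_const', h]

lemma pvValid_ne (cols : List (List String)) (d : List Nat) (hv : pvValid cols d) :
    ∀ c ∈ cols, c ≠ [] := by
  induction hv with
  | nil => intro c hc; simp at hc
  | @cons a b l1 l2 h hrest ih =>
    intro c hc
    rcases List.mem_cons.mp hc with rfl | hc'
    · exact List.ne_nil_of_length_pos (by omega)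
    · exact ih c hc'

lemma pvSuccD_valid (cols : List (List String)) (d : List Nat) (p : Nat)
    (hv : pvValid cols d) (h : pvFindP (cols.zip d) = some p) :
    pvValid cols (pvSuccD p d) := by
  induction cols generalizing d p with
  | nil => cases hv; simp [pvFindP] at h
  | cons c cs ih =>
    cases d with
    | nil => cases hv
    | cons d0 ds =>
      obtain ⟨hd0, hv'⟩ := List.forall₂_cons.mp hv
      rw [List.zip_cons_cons, pvFindP] at h
      cases hfp : pvFindP (cs.zip ds) with
      | some j =>
        rw [hfp] at h
        simp only [Option.some.injEq] at h
        subst h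
        exact List.Forall₂.cons hd0 (ih ds j hv' hfp)
      | none =>
        rw [hfp] at h
        simp only [] at h
        by_cases hlt : d0 < c.length - 1
        · rw [if_pos hlt] at h
          simp only [Option.some.injEq] at h
          subst h
          rw [pvSuccD]
          refine List.Forall₂.cons (by omega) ?_
          rw [pvMapZero ds cs (List.Forall₂.length_eq hv').symm]
          exact pvZeros_valid cs (pvValid_ne cs ds hv')
        · rw [if_neg hlt] at h
          simp at h

lemma pvStep_len (com prev : List String) (E : List (List String)) :
    (pvStep com prev E).length = E.length := by
  rw [pvStep]
  by_cases h2 : (pvDiff com prev E).1 < 2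
  · simp [h2, pvDiff_len]
  · have h2' : 2 ≤ (pvDiff com prev E).1 := by omega
    have hle : (pvDiff com prev E).1 ≤ E.length := pvDiff_fst_le com prev E
    have hlen : (pvDiff com prev E).2.length = E.length := pvDiff_len com prev E
    simp only [h2, if_false]
    rw [pvClear_eq_clearN _ _ h2' (by omega), pvClearN_len _ _ (by omega)]
    exact hlen

lemma pvTrail_peel (cols : List (List String)) (hne : ∀ c ∈ cols, c ≠ []) :
    ∀ d p, pvValid cols d → pvFindP (cols.zip d) = some p →
      pvTrail cols d = pvSuccD p d :: pvTrail cols (pvSuccD p d) := by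
  induction cols with
  | nil => intro d p hv h; cases hv; simp [pvFindP] at h
  | cons c cs ih =>
    intro d p hv h
    cases d with
    | nil => cases hv
    | cons d0 ds =>
      obtain ⟨hd0, hv'⟩ := List.forall₂_cons.mp hv
      have hne' : ∀ c' ∈ cs, c' ≠ [] := fun c' hh => hne c' (by simp [hh])
      rw [List.zip_cons_cons, pvFindP] at h
      cases hfp : pvFindP (cs.zip ds) with
      | some j =>
        rw [hfp] at h
        simp only [Option.some.injEq] at h
        subst h
        rw [pvSuccD, pvTrail, pvTrail, ih hne' ds j hv' hfp, List.map_cons, List.cons_append]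
      | none =>
        rw [hfp] at h
        simp only [] at h
        by_cases hlt : d0 < c.length - 1
        · rw [if_pos hlt] at h
          simp only [Option.some.injEq] at h
          subst h
          have hds : ds = pvMaxd cs := pvFindP_none cs ds hv' hfp
          rw [pvSuccD, pvMapZero ds cs (List.Forall₂.length_eq hv').symm]
          rw [pvTrail, hds, pvTrail_maxd, List.map_nil, List.nil_append]
          have hm : c.length - (d0 + 1) = (c.length - (d0 + 1 + 1)) + 1 := by omega
          rw [hm, List.range'_succ, List.flatMap_cons, pvDT_cons cs hne', List.map_cons]
          rw [pvTrail, List.cons_append, ← pvDT_cons cs hne']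
        · rw [if_neg hlt] at h
          simp at h

lemma pvGroups_eq (A B C : List String) : MP_elements A B C = pvGroups A B C := by
  by_cases h1 : PySem.List.pyGetD A 0 "" = "any" <;>
    by_cases h2 : PySem.List.pyGetD B 0 "" = "any" <;>
      by_cases h3 : PySem.List.pyGetD C 0 "" = "any" <;>
        simp [MP_elements, pvGroups, h1, h2, h3]

-- new lemmas for the digits-based port B

lemma pvSuccD_len (p : Nat) (d : List Nat) : (pvSuccD p d).length = d.length := by
  induction d generalizing p with
  | nil => cases p <;> rfl
  | cons d0 ds ih =>
    cases p with
    | zero => simp [pvSuccD]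
    | succ p => simp [pvSuccD, ih p]

lemma pvVals_len (cols : List (List String)) (d : List Nat) :
    (pvVals cols d).length = min cols.length d.length := by
  simp [pvVals]

lemma pvLastNZ_zeros (l : List Nat) : pvLastNZ (l.map (fun _ => 0)) = none := by
  induction l with
  | nil => rfl
  | cons a l ih =>
    rw [List.map_cons]
    rw [show pvLastNZ ((fun _ => (0:Nat)) a :: List.map (fun _ => 0) l)
        = match pvLastNZ (List.map (fun _ => (0:Nat)) l) with
          | some j => some (j + 1)
          | none => if (0:Nat) ≠ 0 then some 0 else none from rfl]
    rw [ih]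
    simp

lemma pvLastNZ_succ (cols : List (List String)) :
    ∀ d p, pvValid cols d → pvFindP (cols.zip d) = some p →
      pvLastNZ (pvSuccD p d) = some p := by
  induction cols with
  | nil => intro d p hv h; cases hv; simp [pvFindP] at h
  | cons c cs ih =>
    intro d p hv h
    cases d with
    | nil => cases hv
    | cons d0 ds =>
      obtain ⟨hd0, hv'⟩ := List.forall₂_cons.mp hv
      rw [List.zip_cons_cons, pvFindP] at h
      cases hfp : pvFindP (cs.zip ds) with
      | some j =>
        rw [hfp] at h
        simp only [Option.some.injEq] at h
        subst h
        rw [pvSuccD, pvLastNZ, ih ds j hv' hfp]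
      | none =>
        rw [hfp] at h
        simp only [] at h
        by_cases hlt : d0 < c.length - 1
        · rw [if_pos hlt] at h
          simp only [Option.some.injEq] at h
          subst h
          rw [pvSuccD, pvLastNZ, pvLastNZ_zeros]
          simp
        · rw [if_neg hlt] at h
          simp at h

lemma pvLastNZ_any (l : List Nat) (p : Nat) (h : pvLastNZ l = some p) :
    l.any (fun d => d ≠ 0) = true := by
  induction l generalizing p with
  | nil => simp [pvLastNZ] at h
  | cons a l ih =>
    rw [pvLastNZ] at h
    cases hl : pvLastNZ l with
    | some j =>
      simp only [List.any_cons, Bool.or_eq_true]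
      exact Or.inr (ih j hl)
    | none =>
      rw [hl] at h
      simp only [] at h
      by_cases ha : a ≠ 0
      · simp [ha]
      · rw [if_neg ha] at h; simp at h

lemma pvMapFst_zip_maxd (cs : List (List String)) (zs : List Nat)
    (h : zs.length = cs.length) :
    (cs.zip zs).map (fun gd => gd.1.getD (gd.1.length - 1) "") = pvVals cs (pvMaxd cs) := by
  induction cs generalizing zs with
  | nil => rfl
  | cons c cs ih =>
    cases zs with
    | nil => simp at h
    | cons z zs =>
      simp only [List.zip_cons_cons, List.map_cons]
      rw [ih zs (by simpa using h)]
      rfl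

lemma pvPrev_eq (cols : List (List String)) :
    ∀ d p, pvValid cols d → pvFindP (cols.zip d) = some p →
      pvPrev (cols.zip (pvSuccD p d)) p = pvVals cols d := by
  induction cols with
  | nil => intro d p hv h; cases hv; simp [pvFindP] at h
  | cons c cs ih =>
    intro d p hv h
    cases d with
    | nil => cases hv
    | cons d0 ds =>
      obtain ⟨hd0, hv'⟩ := List.forall₂_cons.mp hv
      rw [List.zip_cons_cons, pvFindP] at h
      cases hfp : pvFindP (cs.zip ds) with
      | some j =>
        rw [hfp] at h
        simp only [Option.some.injEq] at h
        subst h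
        rw [pvSuccD, List.zip_cons_cons, pvPrev, ih ds j hv' hfp]
        rfl
      | none =>
        rw [hfp] at h
        simp only [] at h
        by_cases hlt : d0 < c.length - 1
        · rw [if_pos hlt] at h
          simp only [Option.some.injEq] at h
          subst h
          have hds : ds = pvMaxd cs := pvFindP_none cs ds hv' hfp
          rw [pvSuccD, List.zip_cons_cons, pvPrev]
          rw [pvMapFst_zip_maxd cs _ (by simpa using (List.Forall₂.length_eq hv').symm)]
          rw [← hds]
          simp only [Nat.add_sub_cancel]
          rfl
        · rw [if_neg hlt] at h
          simp at h

lemma pvChangedIdx_ge (l : List (String × String)) (b x : Nat)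
    (h : x ∈ pvChangedIdx l b) : b ≤ x := by
  induction l generalizing b with
  | nil => simp [pvChangedIdx] at h
  | cons a l ih =>
    rw [pvChangedIdx] at h
    by_cases hne : a.1 ≠ a.2
    · rcases a with ⟨a1, a2⟩
      rw [if_pos hne] at h
      rcases List.mem_cons.mp h with rfl | h'
      · exact le_refl _
      · exact Nat.le_of_succ_le (ih (b + 1) h')
    · rcases a with ⟨a1, a2⟩
      rw [if_neg hne] at h
      exact Nat.le_of_succ_le (ih (b + 1) h)

lemma pvDiff_fst_eq_changed (cur prev : List String) (E : List (List String)) :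
    ∀ b, cur.length = prev.length → prev.length = E.length →
      (pvDiff cur prev E).1 = (pvChangedIdx (prev.zip cur) b).length := by
  induction cur generalizing prev E with
  | nil =>
    intro b h1 h2
    have : prev = [] := List.eq_nil_of_length_eq_zero h1.symm
    subst this
    simp [pvDiff, pvChangedIdx]
  | cons i com ih =>
    intro b h1 h2
    cases prev with
    | nil => simp at h1
    | cons im1 pr =>
      cases E with
      | nil => simp at h2
      | cons e ex =>
        rw [List.zip_cons_cons, pvDiff, pvChangedIdx]
        by_cases hne : i ≠ im1
        · rw [if_pos hne, if_pos (fun hh => hne hh.symm)]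
          simp only [List.length_cons]
          rw [ih pr ex (b + 1) (by simpa using h1) (by simpa using h2)]
        · rw [if_neg hne, if_neg (fun hh => hne hh.symm)]
          exact ih pr ex (b + 1) (by simpa using h1) (by simpa using h2)

lemma pvDiff_snd_eq_rebuild (cur prev : List String) (E : List (List String)) :
    ∀ b, cur.length = prev.length → prev.length = E.length →
      (pvDiff cur prev E).2 = (List.range E.length).map (fun i =>
        if (b + i) ∈ pvChangedIdx (prev.zip cur) b then E.getD i [] ++ [prev.getD i ""]
        else E.getD i []) := by
  induction cur generalizing prev E with
  | nil =>
    intro b h1 h2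
    have hp : prev = [] := List.eq_nil_of_length_eq_zero h1.symm
    subst hp
    have hE : E = [] := List.eq_nil_of_length_eq_zero h2.symm
    subst hE
    simp [pvDiff]
  | cons i com ih =>
    intro b h1 h2
    cases prev with
    | nil => simp at h1
    | cons im1 pr =>
      cases E with
      | nil => simp at h2
      | cons e ex =>
        have h1' : com.length = pr.length := by simpa using h1
        have h2' : pr.length = ex.length := by simpa using h2
        have IH := ih pr ex (b + 1) h1' h2'
        have hmem0 : ((b + 0) ∈ pvChangedIdx ((im1, i) :: pr.zip com) b) ↔ ¬ im1 = i := by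
          rw [pvChangedIdx]
          by_cases hne : im1 = i
          · rw [if_neg (by simp [hne])]
            simp only [hne, not_true_eq_false, iff_false]
            intro hm
            exact absurd (pvChangedIdx_ge _ _ _ hm) (by omega)
          · rw [if_pos (by exact hne)]
            simp [hne]
        have htail : ∀ i' ∈ List.range ex.length,
            (if (b + (i' + 1)) ∈ pvChangedIdx ((im1, i) :: pr.zip com) b
              then (e :: ex).getD (i' + 1) [] ++ [(im1 :: pr).getD (i' + 1) ""]
              else (e :: ex).getD (i' + 1) [])
            = (if ((b + 1) + i') ∈ pvChangedIdx (pr.zip com) (b + 1)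
              then ex.getD i' [] ++ [pr.getD i' ""] else ex.getD i' []) := by
          intro i' _
          have harith : b + (i' + 1) = (b + 1) + i' := by omega
          rw [harith]
          have hm : (((b + 1) + i') ∈ pvChangedIdx ((im1, i) :: pr.zip com) b)
              ↔ ((b + 1) + i') ∈ pvChangedIdx (pr.zip com) (b + 1) := by
            rw [pvChangedIdx]
            by_cases hne : im1 = i
            · rw [if_neg (by simp [hne])]
            · rw [if_pos (by exact hne), List.mem_cons]
              exact or_iff_right (by omega)
          simp only [List.getD_cons_succ]
          exact if_congr hm rfl rfl
        have hfinal : (List.range (e :: ex).length).map (fun i' =>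
            if (b + i') ∈ pvChangedIdx ((im1, i) :: pr.zip com) b
            then (e :: ex).getD i' [] ++ [(im1 :: pr).getD i' ""] else (e :: ex).getD i' [])
            = (if ¬ im1 = i then e ++ [im1] else e) :: (pvDiff com pr ex).2 := by
          rw [List.length_cons, List.range_succ_eq_map, List.map_cons, List.map_map]
          congr 1
          · show (if (b + 0) ∈ pvChangedIdx ((im1, i) :: pr.zip com) b
              then (e :: ex).getD 0 [] ++ [(im1 :: pr).getD 0 ""] else (e :: ex).getD 0 [])
              = (if ¬ im1 = i then e ++ [im1] else e)
            by_cases hne : im1 = i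
            · rw [if_neg (fun hm => (hmem0.mp hm) hne), if_neg (by simp [hne])]
              rfl
            · rw [if_pos (hmem0.mpr hne), if_pos hne]
              rfl
          · rw [IH]
            refine List.map_congr_left ?_
            intro i' hi'
            simp only [Function.comp, Nat.succ_eq_add_one]
            exact htail i' hi'
        rw [List.zip_cons_cons, hfinal, pvDiff]
        by_cases hx : i = im1
        · rw [if_neg (by simp [hx]), if_neg (by simp [hx])]
        · rw [if_pos hx, if_pos (fun hh => hx hh.symm)]

-- the per-tuple update of port B at an advanced digit tuple equals A's pvStep
lemma pvStepB_eq (cols : List (List String)) (d : List Nat) (p : Nat)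
    (E : List (List String)) (acc : List (List (String × List String)))
    (hv : pvValid cols d) (hfp : pvFindP (cols.zip d) = some p)
    (hE : E.length = cols.length) :
    pvStepB cols (E, acc) (pvSuccD p d)
      = (pvStep (pvVals cols (pvSuccD p d)) (pvVals cols d) E,
         acc ++ [pvMkQ (pvVals cols (pvSuccD p d))
           (pvStep (pvVals cols (pvSuccD p d)) (pvVals cols d) E).flatten]) := by
  have hlen : d.length = cols.length := (List.Forall₂.length_eq hv).symm
  have hlnz := pvLastNZ_succ cols d p hv hfp
  have hany := pvLastNZ_any _ _ hlnz
  have hprev := pvPrev_eq cols d p hv hfp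
  have hcurlen : (pvVals cols (pvSuccD p d)).length = cols.length := by
    rw [pvVals_len, pvSuccD_len, hlen, min_self]
  have hprevlen : (pvVals cols d).length = cols.length := by
    rw [pvVals_len, hlen, min_self]
  have hfst := pvDiff_fst_eq_changed (pvVals cols (pvSuccD p d)) (pvVals cols d) E 0
    (by rw [hcurlen, hprevlen]) (by rw [hprevlen, hE])
  have hsnd := pvDiff_snd_eq_rebuild (pvVals cols (pvSuccD p d)) (pvVals cols d) E 0
    (by rw [hcurlen, hprevlen]) (by rw [hprevlen, hE])
  simp only [Nat.zero_add] at hsnd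
  have hexcl : (if (pvSuccD p d).any (fun x => x ≠ 0) then
      let p' := (pvLastNZ (pvSuccD p d)).getD 0
      let prev := pvPrev (cols.zip (pvSuccD p d)) p'
      let changed := pvChangedIdx (prev.zip (pvVals cols (pvSuccD p d))) 0
      let e1 := (List.range cols.length).map (fun i =>
        if i ∈ changed then E.getD i [] ++ [prev.getD i ""] else E.getD i [])
      if 1 < changed.length then
        e1.take (cols.length - changed.length + 1)
          ++ List.replicate (cols.length - (cols.length - changed.length + 1)) []
      else e1
    else E) = pvStep (pvVals cols (pvSuccD p d)) (pvVals cols d) E := by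
    rw [if_pos hany]
    simp only [hlnz, Option.getD_some, hprev]
    rw [pvStep]
    set r := pvDiff (pvVals cols (pvSuccD p d)) (pvVals cols d) E with hr
    have he1 : (List.range cols.length).map (fun i =>
        if i ∈ pvChangedIdx ((pvVals cols d).zip (pvVals cols (pvSuccD p d))) 0
        then E.getD i [] ++ [(pvVals cols d).getD i ""] else E.getD i []) = r.2 := by
      rw [hsnd, hE]
    rw [he1]
    have hchg : (pvChangedIdx ((pvVals cols d).zip (pvVals cols (pvSuccD p d))) 0).length
        = r.1 := hfst.symm
    rw [hchg]
    by_cases h2 : r.1 < 2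
    · rw [if_neg (by omega), if_pos h2]
    · rw [if_pos (by omega), if_neg h2]
      have hle : r.1 ≤ E.length := pvDiff_fst_le _ _ _
      have hlenr : r.2.length = E.length := pvDiff_len _ _ _
      rw [pvClear_eq_clearN r.1 r.2 (by omega) (by omega)]
      rw [pvClearN, hlenr, hE]
      congr 1
      · congr 1
        omega
      · congr 1
        omega
  rw [pvStepB]
  simp only []
  rw [hexcl]

lemma pvSimB (cols : List (List String)) :
    ∀ (n : Nat) (d : List Nat) (E : List (List String))
      (acc : List (List (String × List String))),
      (pvTrail cols d).length = n → pvValid cols d → E.length = cols.length →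
      pvLoopA ((pvTrail cols d).map (pvVals cols)) (pvVals cols d) E acc
        = ((pvTrail cols d).foldl (pvStepB cols) (E, acc)).2 := by
  intro n
  induction n with
  | zero =>
    intro d E acc hn hv hE
    rw [List.length_eq_zero_iff.mp hn]
    rfl
  | succ n ih =>
    intro d E acc hn hv hE
    have hne : ∀ c ∈ cols, c ≠ [] := pvValid_ne cols d hv
    cases hfp : pvFindP (cols.zip d) with
    | none =>
      rw [pvFindP_none cols d hv hfp, pvTrail_maxd]
      rfl
    | some p =>
      have hpeel := pvTrail_peel cols hne d p hv hfp
      rw [hpeel, List.map_cons, pvLoopA, List.foldl_cons]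
      rw [pvStepB_eq cols d p E acc hv hfp hE]
      have hn' : (pvTrail cols (pvSuccD p d)).length = n := by
        have := congrArg List.length hpeel
        simp only [List.length_cons, hn] at this
        omega
      exact ih (pvSuccD p d) _ _ hn' (pvSuccD_valid cols d p hv hfp)
        (by rw [pvStep_len, hE])

lemma pvAny_zeros (cols : List (List String)) :
    (pvZeros cols).any (fun x => x ≠ 0) = false := by
  induction cols with
  | nil => rfl
  | cons c cs ih => simpa [pvZeros, List.any_cons] using ih

lemma pvFlatten_replicate (n : Nat) :
    (List.replicate n ([] : List String)).flatten = [] := by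
  induction n with
  | zero => rfl
  | succ n ih => simp [List.replicate_succ, ih]

-- ===== VERDICT =====
theorem MP_elements4query_spec : Claim_equal_MP_elements4query := by
  intro A B C _ hpre
  unfold Spec_MP_elements4query
  obtain ⟨hA, hB, hC⟩ := hpre
  have hne : ∀ c ∈ pvGroups A B C, c ≠ [] := by
    intro c hc
    have := (List.mem_filter.mp hc).1
    simp only [List.mem_cons, List.not_mem_nil, or_false] at this
    rcases this with rfl | rfl | rfl <;> assumption
  set cols := pvGroups A B C with hcols
  have hdt := pvDT_cons cols hne
  have hcombos : pvProduct (MP_elements A B C)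
      = pvVals cols (pvZeros cols)
          :: (pvTrail cols (pvZeros cols)).map (pvVals cols) := by
    rw [pvGroups_eq, pvProduct_eq, ← hcols, hdt, List.map_cons]
  rw [MP_elements4query]
  simp only [hcombos]
  rw [MP_elements4query_alt]
  simp only [← hcols, hdt]
  rw [List.foldl_cons]
  have hstep0 : pvStepB cols (List.replicate cols.length [], []) (pvZeros cols)
      = (List.replicate cols.length [],
         [pvMkQ (pvVals cols (pvZeros cols)) []]) := by
    rw [pvStepB]
    simp only [pvAny_zeros, if_false, Bool.false_eq_true]
    rw [pvFlatten_replicate, List.nil_append]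
  rw [hstep0]
  have hlenv : (pvVals cols (pvZeros cols)).length = cols.length := by
    simp [pvVals, pvZeros]
  rw [hlenv]
  exact pvSimB cols (pvTrail cols (pvZeros cols)).length (pvZeros cols)
    (List.replicate cols.length []) _ rfl (pvZeros_valid cols hne) (by simp)
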